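-- pv_equiv track=rewrite | github.com/TheNDCC/AdventCfCode | 2025/dia6/dia6b.py | split_blocks_by_columns
-- ===== SOURCE A (Python) =====
-- from typing import List
--
-- def split_blocks_by_columns(sep_cols: List[bool]) -> List[tuple]:
--     """
--     Dado el vector de columnas separadoras, devuelve lista de (start_col, end_col)
--     para bloques contiguos de columnas no-separadoras. end_col inclusive.
--     """
--     blocks = []
--     c = 0
--     n = len(sep_cols)
--     while c < n:
--         # skip separators
--         while c < n and sep_cols[c]:
--             c += 1
--         if c >= n:
--             break
--         start = c
--         while c < n and not sep_cols[c]: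
--             c += 1
--         end = c - 1
--         blocks.append((start, end))
--     return blocks
-- ===== SOURCE B (Python) =====
-- from typing import List
--
-- def split_blocks_by_columns(sep_cols: List[bool]) -> List[tuple]:
--     # Edge detection: pad with separators; a block starts where a separator is
--     # followed by a non-separator, and ends where a non-separator is followed
--     # by a separator. Pair the two edge lists positionally.
--     padded = [True] + list(sep_cols) + [True]
--     n = len(sep_cols)
--     starts = [i for i in range(n) if not padded[i + 1] and padded[i]]
--     ends = [i for i in range(n) if not padded[i + 1] and padded[i + 2]]
--     return list(zip(starts, ends))
-- ===== Notes on version B (the rewrite author's own statement) =====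
-- stated objective: alternative
-- what changed: Replaces A's stateful nested skip/collect scan with edge detection on a separator-padded array: start and end boundaries are found by two independent comprehensions and paired with zip.
import Mathlib
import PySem

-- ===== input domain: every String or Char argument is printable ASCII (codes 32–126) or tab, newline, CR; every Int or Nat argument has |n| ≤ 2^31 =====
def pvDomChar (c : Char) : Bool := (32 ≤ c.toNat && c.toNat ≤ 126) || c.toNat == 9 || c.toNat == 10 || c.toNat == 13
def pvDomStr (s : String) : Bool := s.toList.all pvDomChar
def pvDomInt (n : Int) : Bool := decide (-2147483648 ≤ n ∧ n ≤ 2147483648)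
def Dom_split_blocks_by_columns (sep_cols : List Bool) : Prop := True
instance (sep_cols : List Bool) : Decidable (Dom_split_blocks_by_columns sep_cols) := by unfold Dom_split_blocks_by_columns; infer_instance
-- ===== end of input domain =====

-- B replaces A's stateful nested skip/collect scan by edge detection over a separator-padded
-- array: start and end boundaries are computed independently and paired with zip (objective: alternative).

-- ===== PORT A =====
-- inner `while c < n and sep_cols[c]: c += 1` (fuel n - c bounds the loop; the guard `c < n` is A's own)
def pvSkipTrue (sep : List Bool) : Nat → Nat → Nat
  | 0, c => c
  | fuel + 1, c =>
    if c < sep.length then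
      if sep.getD c false then pvSkipTrue sep fuel (c + 1) else c
    else c

-- inner `while c < n and not sep_cols[c]: c += 1`
def pvSkipFalse (sep : List Bool) : Nat → Nat → Nat
  | 0, c => c
  | fuel + 1, c =>
    if c < sep.length then
      if sep.getD c false then c else pvSkipFalse sep fuel (c + 1)
    else c

-- outer `while c < n: …` (each iteration advances c, so n + 1 fuel suffices)
def pvOuter (sep : List Bool) : Nat → Nat → List (Int × Int)
  | 0, _ => []
  | fuel + 1, c =>
    if c < sep.length then
      let c1 := pvSkipTrue sep (sep.length - c) c
      if sep.length ≤ c1 then []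
      else
        let c2 := pvSkipFalse sep (sep.length - c1) c1
        ((c1 : Int), (c2 : Int) - 1) :: pvOuter sep fuel c2
    else []

def split_blocks_by_columns (sep_cols : List Bool) : List (Int × Int) :=
  pvOuter sep_cols (sep_cols.length + 1) 0

-- ===== PORT B =====
-- padded = [True] + list(sep_cols) + [True]; two comprehensions over range(n); zip
def split_blocks_by_columns_alt (sep_cols : List Bool) : List (Int × Int) :=
  let padded := true :: (sep_cols ++ [true])
  let n := sep_cols.length
  let starts := ((List.range n).filter
    (fun i => !(padded.getD (i + 1) true) && padded.getD i true)).map (fun (i : Nat) => (i : Int))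
  let ends := ((List.range n).filter
    (fun i => !(padded.getD (i + 1) true) && padded.getD (i + 2) true)).map (fun (i : Nat) => (i : Int))
  starts.zip ends

-- ===== PRECONDITION & SPEC =====
def Spec_split_blocks_by_columns (sep_cols : List Bool) (out : List (Int × Int)) : Prop := out = split_blocks_by_columns_alt sep_cols
instance (sep_cols : List Bool) (out : List (Int × Int)) : Decidable (Spec_split_blocks_by_columns sep_cols out) := by unfold Spec_split_blocks_by_columns; infer_instance

-- ===== CLAIM (what is proved, stated in full; the proofs are below) =====
def Claim_equal_split_blocks_by_columns : Prop := ∀ (sep_cols : List Bool), Dom_split_blocks_by_columns sep_cols → Spec_split_blocks_by_columns sep_cols (split_blocks_by_columns sep_cols)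

-- ===== LEMMAS AND PROOFS =====

-- canonical one-step recursion both ports are reduced to
def pvCanon (l : List Bool) (pos : Int) : List (Int × Int) :=
  match l with
  | [] => []
  | true :: t => pvCanon t (pos + 1)
  | false :: t =>
      ((pos, pos + ((t.takeWhile (· == false)).length : Int))) ::
        pvCanon (t.dropWhile (· == false)) (pos + ((t.takeWhile (· == false)).length : Int) + 1)
termination_by l.length
decreasing_by
  all_goals first
    | exact Nat.lt_succ_self _
    | exact Nat.lt_succ_of_le (List.length_dropWhile_le _ t)

theorem pvCanon_nil (pos : Int) : pvCanon [] pos = [] := by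
  rw [pvCanon.eq_def]

theorem pvCanon_true (t : List Bool) (pos : Int) :
    pvCanon (true :: t) pos = pvCanon t (pos + 1) := by
  rw [pvCanon.eq_def]

theorem pvCanon_false (t : List Bool) (pos : Int) :
    pvCanon (false :: t) pos =
      ((pos, pos + ((t.takeWhile (· == false)).length : Int))) ::
        pvCanon (t.dropWhile (· == false)) (pos + ((t.takeWhile (· == false)).length : Int) + 1) := by
  rw [pvCanon.eq_def]

theorem pvDropWhile_eq_drop (p : Bool → Bool) (l : List Bool) :
    l.dropWhile p = l.drop (l.takeWhile p).length := by
  induction l with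
  | nil => rfl
  | cons b t ih =>
    by_cases h : p b = true
    · simp [List.dropWhile, List.takeWhile, h, ih]
    · simp [List.dropWhile, List.takeWhile, h]

theorem pvGetD_lt (l : List Bool) (c : Nat) (h : c < l.length) : l.getD c false = l[c] := by
  rw [List.getD_eq_getElem?_getD, List.getElem?_eq_getElem h, Option.getD_some]

theorem pvSkipTrue_spec (sep : List Bool) (fuel c : Nat) (hf : sep.length - c ≤ fuel) :
    pvSkipTrue sep fuel c = c + ((sep.drop c).takeWhile (· == true)).length := by
  induction fuel generalizing c with
  | zero =>
    rw [List.drop_eq_nil_of_le (by omega)]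
    simp [pvSkipTrue]
  | succ fuel ih =>
    by_cases h : c < sep.length
    · rw [List.drop_eq_getElem_cons h]
      cases hb : sep[c] with
      | false =>
        rw [pvSkipTrue]
        simp [h, pvGetD_lt sep c h, hb, List.takeWhile_cons]
      | true =>
        rw [pvSkipTrue]
        simp only [h, if_pos, pvGetD_lt sep c h, hb, List.takeWhile_cons]
        rw [ih (c + 1) (by omega)]
        simp
        omega
    · rw [List.drop_eq_nil_of_le (by omega)]
      rw [pvSkipTrue]
      simp [h]

theorem pvSkipFalse_spec (sep : List Bool) (fuel c : Nat) (hf : sep.length - c ≤ fuel) :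
    pvSkipFalse sep fuel c = c + ((sep.drop c).takeWhile (· == false)).length := by
  induction fuel generalizing c with
  | zero =>
    rw [List.drop_eq_nil_of_le (by omega)]
    simp [pvSkipFalse]
  | succ fuel ih =>
    by_cases h : c < sep.length
    · rw [List.drop_eq_getElem_cons h]
      cases hb : sep[c] with
      | true =>
        rw [pvSkipFalse]
        simp [h, pvGetD_lt sep c h, hb, List.takeWhile_cons]
      | false =>
        rw [pvSkipFalse]
        simp only [h, if_pos, pvGetD_lt sep c h, hb, Bool.false_eq_true, if_false, List.takeWhile_cons]
        rw [ih (c + 1) (by omega)]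
        simp
        omega
    · rw [List.drop_eq_nil_of_le (by omega)]
      rw [pvSkipFalse]
      simp [h]

theorem pvSkipTrue_lands (sep : List Bool) (fuel c : Nat) (hf : sep.length - c ≤ fuel)
    (hlt : pvSkipTrue sep fuel c < sep.length) :
    sep.getD (pvSkipTrue sep fuel c) false = false := by
  induction fuel generalizing c with
  | zero =>
    simp only [pvSkipTrue] at hlt ⊢
    omega
  | succ fuel ih =>
    by_cases h : c < sep.length
    · cases hb : sep[c] with
      | true =>
        have hg : sep.getD c false = true := by rw [pvGetD_lt sep c h, hb]
        rw [pvSkipTrue] at hlt ⊢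
        simp only [h, hg, if_true] at hlt ⊢
        exact ih (c + 1) (by omega) hlt
      | false =>
        rw [pvSkipTrue]
        simp [h, pvGetD_lt sep c h, hb, List.takeWhile_cons]
    · rw [pvSkipTrue] at hlt
      simp only [h, if_false] at hlt

theorem pvCanon_skipTrues (l : List Bool) (pos : Int) :
    pvCanon l pos = pvCanon (l.dropWhile (· == true)) (pos + (l.takeWhile (· == true)).length) := by
  induction l generalizing pos with
  | nil => simp [pvCanon_nil]
  | cons b t ih =>
    cases b
    · simp [List.takeWhile, List.dropWhile]
    · rw [pvCanon_true, ih (pos + 1)]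
      simp [List.takeWhile, List.dropWhile]
      ring_nf

theorem pvOuter_spec (sep : List Bool) (fuel c : Nat) (hf : sep.length - c < fuel) :
    pvOuter sep fuel c = pvCanon (sep.drop c) (c : Int) := by
  induction fuel generalizing c with
  | zero => omega
  | succ fuel ih =>
    by_cases h : c < sep.length
    · have hc1 : pvSkipTrue sep (sep.length - c) c
          = c + ((sep.drop c).takeWhile (· == true)).length :=
        pvSkipTrue_spec sep (sep.length - c) c (le_refl _)
      set T := ((sep.drop c).takeWhile (· == true)).length with hT
      have hdropT : sep.drop (c + T) = (sep.drop c).dropWhile (· == true) := by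
        rw [pvDropWhile_eq_drop, ← hT, List.drop_drop]
      rw [pvCanon_skipTrues (sep.drop c) (c : Int), ← hT, ← hdropT]
      by_cases hge : sep.length ≤ c + T
      · rw [pvOuter]
        simp only [h, if_pos, hc1, hge]
        rw [List.drop_eq_nil_of_le (by omega), pvCanon_nil]
      · -- the block starts at c1 = c + T, a non-separator column
        have hb1 : sep[c + T]'(by omega) = false := by
          have hl := pvSkipTrue_lands sep (sep.length - c) c (le_refl _) (by omega)
          rw [hc1] at hl
          rwa [pvGetD_lt sep (c + T) (by omega)] at hl
        have hc2 : pvSkipFalse sep (sep.length - (c + T)) (c + T)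
            = c + T + ((sep.drop (c + T)).takeWhile (· == false)).length :=
          pvSkipFalse_spec sep (sep.length - (c + T)) (c + T) (le_refl _)
        have hdc1 : sep.drop (c + T) = false :: sep.drop (c + T + 1) := by
          rw [List.drop_eq_getElem_cons (by omega : c + T < sep.length), hb1]
        set k := ((sep.drop (c + T + 1)).takeWhile (· == false)).length with hk
        have hlen : ((sep.drop (c + T)).takeWhile (· == false)).length = k + 1 := by
          rw [hdc1, List.takeWhile_cons, if_pos (show (false == false) = true from rfl),
            List.length_cons, ← hk]
        rw [hlen] at hc2
        have hdropF : sep.drop (c + T + 1 + k)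
            = (sep.drop (c + T + 1)).dropWhile (· == false) := by
          rw [pvDropWhile_eq_drop, ← hk, List.drop_drop]
        rw [pvOuter]
        simp only [h, if_pos, hc1, hge, if_false]
        rw [hc2, hdc1, pvCanon_false, ← hk]
        rw [ih (c + T + (k + 1)) (by omega)]
        rw [show c + T + (k + 1) = c + T + 1 + k from by omega, hdropF]
        congr 1
        · simp only [Prod.mk.injEq]
          constructor
          · push_cast; ring
          · push_cast; ring
        · congr 1
          push_cast; ring
    · rw [pvOuter, List.drop_eq_nil_of_le (by omega), pvCanon_nil]
      simp [h]

-- recursive characterizations of the two edge lists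
def pvRecStarts (prev : Bool) : List Bool → Int → List Int
  | [], _ => []
  | b :: t, pos => if prev && !b then pos :: pvRecStarts b t (pos + 1) else pvRecStarts b t (pos + 1)

def pvRecEnds : List Bool → Int → List Int
  | [], _ => []
  | b :: t, pos =>
      if !b && (t ++ [true]).getD 0 true then pos :: pvRecEnds t (pos + 1) else pvRecEnds t (pos + 1)

-- the starts comprehension equals pvRecStarts
theorem pvRecStarts_cons (prev b : Bool) (t : List Bool) (pos : Int) :
    pvRecStarts prev (b :: t) pos
      = if prev && !b then pos :: pvRecStarts b t (pos + 1) else pvRecStarts b t (pos + 1) := rfl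

theorem pvRecEnds_cons (b : Bool) (t : List Bool) (pos : Int) :
    pvRecEnds (b :: t) pos
      = if !b && (t ++ [true]).getD 0 true then pos :: pvRecEnds t (pos + 1)
        else pvRecEnds t (pos + 1) := rfl

theorem pvStarts_bridge (prev : Bool) (l : List Bool) (base : Int) :
    ((List.range l.length).filter
        (fun i => !((prev :: (l ++ [true])).getD (i + 1) true)
          && (prev :: (l ++ [true])).getD i true)).map (fun (i : Nat) => base + (i : Int))
    = pvRecStarts prev l base := by
  induction l generalizing prev base with
  | nil => simp [pvRecStarts]
  | cons b t ih =>
    have hpred : ((fun i => !((prev :: ((b :: t) ++ [true])).getD (i + 1) true)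
          && (prev :: ((b :: t) ++ [true])).getD i true) ∘ Nat.succ)
        = (fun i => !((b :: (t ++ [true])).getD (i + 1) true)
            && (b :: (t ++ [true])).getD i true) := by
      funext i
      simp [List.getD_cons_succ]
    have hmap : (((List.range t.length).filter
          (fun i => !((b :: (t ++ [true])).getD (i + 1) true)
            && (b :: (t ++ [true])).getD i true)).map Nat.succ).map (fun (i : Nat) => base + (i : Int))
        = pvRecStarts b t (base + 1) := by
      rw [List.map_map, show ((fun (i : Nat) => base + (i : Int)) ∘ Nat.succ)
            = (fun (i : Nat) => (base + 1) + (i : Int)) from by funext i; simp only [Function.comp_apply, Nat.succ_eq_add_one]; push_cast; ring]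
      exact ih b (base + 1)
    have hc : (!((prev :: ((b :: t) ++ [true])).getD (0 + 1) true)
          && (prev :: ((b :: t) ++ [true])).getD 0 true) = (prev && !b) := by
      cases prev <;> cases b <;> rfl
    rw [List.length_cons, List.range_succ_eq_map, List.filter_cons, List.filter_map, hpred, hc,
      pvRecStarts_cons]
    by_cases hpb : (prev && !b) = true
    · rw [if_pos hpb, if_pos hpb, List.map_cons, hmap]
      simp
    · rw [if_neg hpb, if_neg hpb, hmap]

-- the ends comprehension equals pvRecEnds (the padding head is irrelevant for ends)
theorem pvEnds_bridge (prev : Bool) (l : List Bool) (base : Int) :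
    ((List.range l.length).filter
        (fun i => !((prev :: (l ++ [true])).getD (i + 1) true)
          && (prev :: (l ++ [true])).getD (i + 2) true)).map (fun (i : Nat) => base + (i : Int))
    = pvRecEnds l base := by
  induction l generalizing prev base with
  | nil => simp [pvRecEnds]
  | cons b t ih =>
    have hpred : ((fun i => !((prev :: ((b :: t) ++ [true])).getD (i + 1) true)
          && (prev :: ((b :: t) ++ [true])).getD (i + 2) true) ∘ Nat.succ)
        = (fun i => !((b :: (t ++ [true])).getD (i + 1) true)
            && (b :: (t ++ [true])).getD (i + 2) true) := by
      funext i
      simp [List.getD_cons_succ]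
    have hmap : (((List.range t.length).filter
          (fun i => !((b :: (t ++ [true])).getD (i + 1) true)
            && (b :: (t ++ [true])).getD (i + 2) true)).map Nat.succ).map (fun (i : Nat) => base + (i : Int))
        = pvRecEnds t (base + 1) := by
      rw [List.map_map, show ((fun (i : Nat) => base + (i : Int)) ∘ Nat.succ)
            = (fun (i : Nat) => (base + 1) + (i : Int)) from by funext i; simp only [Function.comp_apply, Nat.succ_eq_add_one]; push_cast; ring]
      exact ih b (base + 1)
    have hc : (!((prev :: ((b :: t) ++ [true])).getD (0 + 1) true)
          && (prev :: ((b :: t) ++ [true])).getD (0 + 2) true)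
        = (!b && (t ++ [true]).getD 0 true) := by
      simp [List.getD_cons_succ]
    rw [List.length_cons, List.range_succ_eq_map, List.filter_cons, List.filter_map, hpred, hc,
      pvRecEnds_cons]
    by_cases hb0 : (!b && (t ++ [true]).getD 0 true) = true
    · rw [if_pos hb0, if_pos hb0, List.map_cons, hmap]
      simp
    · rw [if_neg hb0, if_neg hb0, hmap]

-- inside a run of non-separators no start is emitted
theorem pvRecStarts_skipFalse (l : List Bool) (pos : Int) :
    pvRecStarts false l pos
      = pvRecStarts false (l.dropWhile (· == false))
          (pos + ((l.takeWhile (· == false)).length : Int)) := by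
  induction l generalizing pos with
  | nil => simp
  | cons b t ih =>
    cases b
    · have h1 : pvRecStarts false (false :: t) pos = pvRecStarts false t (pos + 1) := by
        simp [pvRecStarts]
      have h2 : List.dropWhile (fun x => x == false) (false :: t)
          = List.dropWhile (fun x => x == false) t := by
        simp [List.dropWhile_cons]
      have h3 : List.takeWhile (fun x => x == false) (false :: t)
          = false :: List.takeWhile (fun x => x == false) t := by
        simp [List.takeWhile_cons]
      rw [h1, ih (pos + 1), h2, h3, List.length_cons]
      congr 1
      push_cast
      ring
    · simp [List.takeWhile_cons, List.dropWhile_cons]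

-- a leading `true` makes the previous flag irrelevant
theorem pvRecStarts_false_drop (l : List Bool) (q : Int) :
    pvRecStarts false (l.dropWhile (· == false)) q
      = pvRecStarts true (l.dropWhile (· == false)) q := by
  induction l generalizing q with
  | nil => simp [pvRecStarts]
  | cons b t ih =>
    cases b
    · simpa [List.dropWhile_cons] using ih q
    · simp [List.dropWhile_cons, pvRecStarts]

theorem pvRecStarts_spec (l : List Bool) (pos : Int) :
    pvRecStarts true l pos = (pvCanon l pos).map Prod.fst := by
  match l with
  | [] => simp [pvRecStarts, pvCanon_nil]
  | true :: t =>
    rw [pvCanon_true, ← pvRecStarts_spec t (pos + 1)]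
    simp [pvRecStarts]
  | false :: t =>
    rw [pvCanon_false]
    simp only [pvRecStarts, Bool.not_false, Bool.and_true, if_pos, List.map_cons]
    rw [pvRecStarts_skipFalse t (pos + 1), pvRecStarts_false_drop t]
    rw [pvRecStarts_spec (t.dropWhile (· == false))
      (pos + 1 + ((t.takeWhile (· == false)).length : Int))]
    congr 2
    ring
termination_by l.length
decreasing_by
  all_goals first
    | exact Nat.lt_succ_self _
    | exact Nat.lt_succ_of_le (List.length_dropWhile_le _ t)

-- an end is emitted exactly at the last column of a run of non-separators
theorem pvRecEnds_run (t : List Bool) (pos : Int) :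
    pvRecEnds (false :: t) pos
      = (pos + ((t.takeWhile (· == false)).length : Int)) ::
          pvRecEnds (t.dropWhile (· == false))
            (pos + ((t.takeWhile (· == false)).length : Int) + 1) := by
  induction t generalizing pos with
  | nil => simp [pvRecEnds]
  | cons b t2 ih =>
    cases b
    · rw [pvRecEnds_cons false (false :: t2) pos, if_neg (by simp), ih (pos + 1)]
      have h2 : List.dropWhile (fun x => x == false) (false :: t2)
          = List.dropWhile (fun x => x == false) t2 := by
        simp [List.dropWhile_cons]
      have h3 : List.takeWhile (fun x => x == false) (false :: t2)
          = false :: List.takeWhile (fun x => x == false) t2 := by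
        simp [List.takeWhile_cons]
      rw [h2, h3, List.length_cons]
      have harith : pos + 1 + ((List.takeWhile (fun x => x == false) t2).length : Int)
          = pos + (((List.takeWhile (fun x => x == false) t2).length + 1 : Nat) : Int) := by
        push_cast
        ring
      rw [harith]
    · simp [pvRecEnds, List.takeWhile_cons, List.dropWhile_cons]

theorem pvRecEnds_spec (l : List Bool) (pos : Int) :
    pvRecEnds l pos = (pvCanon l pos).map Prod.snd := by
  match l with
  | [] => simp [pvRecEnds, pvCanon_nil]
  | true :: t =>
    rw [pvCanon_true, ← pvRecEnds_spec t (pos + 1)]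
    simp [pvRecEnds]
  | false :: t =>
    rw [pvCanon_false, pvRecEnds_run t pos]
    simp only [List.map_cons]
    rw [pvRecEnds_spec (t.dropWhile (· == false))
      (pos + ((t.takeWhile (· == false)).length : Int) + 1)]
termination_by l.length
decreasing_by
  all_goals first
    | exact Nat.lt_succ_self _
    | exact Nat.lt_succ_of_le (List.length_dropWhile_le _ t)

theorem pvZip_fst_snd {α β : Type} (l : List (α × β)) :
    (l.map Prod.fst).zip (l.map Prod.snd) = l := by
  induction l with
  | nil => rfl
  | cons x t ih => simp [List.zip_cons_cons, ih]

-- ===== VERDICT (by name: the statement is the Claim_ definition above) =====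
theorem split_blocks_by_columns_spec : Claim_equal_split_blocks_by_columns := by
  intro sep _
  unfold Spec_split_blocks_by_columns split_blocks_by_columns split_blocks_by_columns_alt
  rw [pvOuter_spec sep (sep.length + 1) 0 (by omega)]
  simp only [List.drop_zero]
  have hs := pvStarts_bridge true sep 0
  have he := pvEnds_bridge true sep 0
  rw [show (fun i : Nat => ((0 : Int) + (i : Int))) = (fun i : Nat => (i : Int)) from by
    funext i; ring] at hs he
  rw [hs, he, pvRecStarts_spec sep 0, pvRecEnds_spec sep 0, pvZip_fst_snd]
  norm_num
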